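-- pv_equiv track=rewrite | github.com/delight-es/Algorithm_Python | 프로그래머스/0/181837. 커피 심부름/커피 심부름.py | solution
-- ===== SOURCE A (Python) =====
-- def solution(order):
--     plus_menu = ['cafelatte', 'hotcafelatte', 'cafelattehot', 'icecafelatte', 'cafelatteice']
--     total = 0
--     for i in order:
--         total += 4500
--         if i in plus_menu:
--             total += 500
--     return total
-- ===== SOURCE B (Python) =====
-- def solution(order):
--     plus_menu = ['cafelatte', 'hotcafelatte', 'cafelattehot', 'icecafelatte', 'cafelatteice']
--     lattes = 0
--     for m in plus_menu:
--         lattes += order.count(m)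
--     return 4500 * len(order) + 500 * lattes
-- ===== Notes on version B (the rewrite author's own statement) =====
-- stated objective: alternative
-- what changed: Inverts the traversal: instead of scanning the orders and testing each against the menu, B computes the base cost in closed form 4500*len(order) and counts lattes by iterating over the five menu items, tallying order.count(m) for each.
import Mathlib
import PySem

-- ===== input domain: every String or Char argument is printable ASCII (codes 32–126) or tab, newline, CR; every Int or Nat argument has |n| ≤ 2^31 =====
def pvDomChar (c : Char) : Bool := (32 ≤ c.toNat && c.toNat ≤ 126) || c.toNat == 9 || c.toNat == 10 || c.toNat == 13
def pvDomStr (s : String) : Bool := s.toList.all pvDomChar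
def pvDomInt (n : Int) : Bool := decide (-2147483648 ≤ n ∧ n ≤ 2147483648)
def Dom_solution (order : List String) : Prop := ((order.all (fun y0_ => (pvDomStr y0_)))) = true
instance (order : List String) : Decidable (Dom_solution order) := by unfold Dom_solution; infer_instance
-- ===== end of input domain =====

-- B inverts the traversal: closed-form base cost 4500*len(order) plus 500 times a latte tally
-- obtained by looping over the five menu items and summing order.count(m) (objective: alternative).


-- ===== PORT A =====
def plusMenu : List String := ["cafelatte", "hotcafelatte", "cafelattehot", "icecafelatte", "cafelatteice"]

def solution (order : List String) : Int :=
  order.foldl (fun total i =>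
    let total := total + 4500
    if i ∈ plusMenu then total + 500 else total) 0

-- ===== PORT B =====
def solution_alt (order : List String) : Int :=
  let lattes := plusMenu.foldl (fun acc m => acc + (PySem.List.count order m : Int)) 0
  4500 * (order.length : Int) + 500 * lattes

-- ===== PRECONDITION & SPEC =====
def Spec_solution (order : List String) (out : Int) : Prop := out = solution_alt order
instance (order : List String) (out : Int) : Decidable (Spec_solution order out) := by unfold Spec_solution; infer_instance

-- ===== CLAIM (what is proved, stated in full; the proofs are below) =====
def Claim_equal_solution : Prop := ∀ (order : List String), Dom_solution order → Spec_solution order (solution order)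

-- ===== LEMMAS AND PROOFS =====

lemma plusMenu_nodup : plusMenu.Nodup := by decide

-- one A-loop step, with the let inlined
lemma step_eq (t : Int) (h : String) :
    (let total := t + 4500
     if h ∈ plusMenu then total + 500 else total)
      = if h ∈ plusMenu then t + 5000 else t + 4500 := by
  by_cases hm : h ∈ plusMenu
  · simp [hm]
    omega
  · simp [hm]

-- A's running total, in closed form over a countP
lemma A_foldl (order : List String) (t : Int) :
    order.foldl (fun total i =>
      let total := total + 4500
      if i ∈ plusMenu then total + 500 else total) t
      = t + 4500 * (order.length : Int)
        + 500 * ((order.countP (fun i => decide (i ∈ plusMenu))) : Int) := by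
  induction order generalizing t with
  | nil => simp
  | cons h tl ih =>
    rw [List.foldl_cons, step_eq t h]
    by_cases hm : h ∈ plusMenu <;>
      · simp only [hm, if_true, if_false, ih, List.countP_cons, List.length_cons,
          decide_true, decide_false]
        push_cast
        ring

-- B's menu loop accumulates the list of per-item counts
lemma B_foldl (order : List String) (menu : List String) (a : Int) :
    menu.foldl (fun acc m => acc + (PySem.List.count order m : Int)) a
      = a + (menu.map (fun m => (order.count m : Int))).sum := by
  induction menu generalizing a with
  | nil => simp
  | cons m ms ih =>
    rw [List.foldl_cons, ih]
    simp [PySem.List.count_eq]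
    ring

-- sum of 0/1 indicators over a duplicate-free list is a membership test
lemma indicator_sum (menu : List String) (h : String) (hnd : menu.Nodup) :
    (menu.map (fun m => if m = h then (1 : Int) else 0)).sum
      = if h ∈ menu then 1 else 0 := by
  induction menu with
  | nil => simp
  | cons m ms ih =>
    rcases List.nodup_cons.mp hnd with ⟨hnm, hms⟩
    by_cases he : m = h
    · subst he
      have : m ∉ ms := hnm
      simp [ih hms, this]
    · have hhm : h ≠ m := Ne.symm he
      simp [he, hhm, ih hms]

-- exchanging the two traversals: summing counts over a duplicate-free menu
-- equals counting order elements that lie in the menu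
lemma sum_counts (menu : List String) (hnd : menu.Nodup) (order : List String) :
    (menu.map (fun m => (order.count m : Int))).sum
      = ((order.countP (fun i => decide (i ∈ menu))) : Int) := by
  induction order with
  | nil => simp
  | cons h tl ih =>
    have hsplit : menu.map (fun m => ((h :: tl).count m : Int))
        = menu.map (fun m => (tl.count m : Int) + (if m = h then (1 : Int) else 0)) := by
      refine List.map_congr_left ?_
      intro m _
      rw [List.count_cons]
      by_cases he : m = h
      · simp [he]
      · simp [he, Ne.symm he]
    rw [hsplit, List.sum_map_add, ih, indicator_sum menu h hnd, List.countP_cons]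
    by_cases hm : h ∈ menu <;> simp [hm]

-- ===== VERDICT (by name: the statement is the Claim_ definition above) =====
theorem solution_spec : Claim_equal_solution := by
  intro order _
  show _ = _
  rw [solution, A_foldl, solution_alt]
  rw [B_foldl, sum_counts plusMenu plusMenu_nodup]
  ring
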